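-- pv_equiv track=rewrite | github.com/microsoft/station-b-libraries | PyStationB/projects/CellSignalling/cellsig_pipeline/pybckg/units.py | conversion_factor_basic
-- ===== SOURCE A (Python) =====
-- from typing import Dict, List
--
-- def conversion_factor_basic(unit1: str, unit2: str) -> int:
--     """Finds the conversion factor from ``unit1`` to ``unit2``. Assumes that both units are basic
--     (units of type "a/b" is *not* allowed).
--
--     Raises:
--         ValueError, if conversion if not possible
--
--     Example:
--         conversion_factor_basic("nM", "mM") = -6, as ``1 nM = 10**-6 mM``.
--         conversion_factor_basic("kg", "g") = 3, as ``1 kg = 10**3 g``.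
--     """
--     prefixes: Dict[str, int] = {
--         "n": -9,
--         "u": -6,
--         "m": -3,
--         "k": 3,
--     }
--
--     error = ValueError(f"Conversion from {unit1} to {unit2} is not possible.")
--
--     # TODO: Make this more robust. E.g. m (mili) is not the same as M (mega).
--     unit1, unit2 = unit1.lower(), unit2.lower()
--
--     # In this case we can have "nM" and "uM", for example. We can however have "uA" and "uB" as well.
--     if len(unit1) == len(unit2):
--         # The case of trivial conversion.
--         if unit1 == unit2:
--             return 0
--         # Otherwise, we check whether the suffix is right
--         if unit1[1:] != unit2[1:]:
--             raise error
--         else: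
--             try:
--                 return prefixes[unit1[0]] - prefixes[unit2[0]]
--             except KeyError:  # pragma: no cover
--                 raise error
--
--     # In this case we can have conversion from "kM" to "M", but as well we can be given non-compatible "kA" and "B".
--     elif len(unit1) > len(unit2):
--         if unit1[1:] != unit2:
--             raise error
--         try:
--             return prefixes[unit1[0]]
--         except KeyError:  # pragma: no cover
--             raise error
--
--     else:  # In this case we can do a simple mathematical trick, swapping the units.
--         return -conversion_factor_basic(unit2, unit1)
-- ===== SOURCE B (Python) =====
-- def conversion_factor_basic(unit1: str, unit2: str) -> int:
--     prefixes = {"n": -9, "u": -6, "m": -3, "k": 3}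
--     u1, u2 = unit1.lower(), unit2.lower()
--     if u1 == u2:
--         return 0
--     base = u2[1:] if len(u1) < len(u2) else u1[1:]
--
--     def exp_of(u):
--         if u == base:
--             return 0
--         if len(u) == len(base) + 1 and u[1:] == base and u[0] in prefixes:
--             return prefixes[u[0]]
--         raise ValueError(f"Conversion from {unit1} to {unit2} is not possible.")
--
--     return exp_of(u1) - exp_of(u2)
-- ===== Notes on version B (the rewrite author's own statement) =====
-- stated objective: simpler
-- what changed: Replaces A's three-way length branching plus self-recursion (swap-and-negate) with a single uniform decomposition: pick the common base unit, parse each unit into its base-10 exponent with one helper, and return the difference of the two exponents.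
import Mathlib
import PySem

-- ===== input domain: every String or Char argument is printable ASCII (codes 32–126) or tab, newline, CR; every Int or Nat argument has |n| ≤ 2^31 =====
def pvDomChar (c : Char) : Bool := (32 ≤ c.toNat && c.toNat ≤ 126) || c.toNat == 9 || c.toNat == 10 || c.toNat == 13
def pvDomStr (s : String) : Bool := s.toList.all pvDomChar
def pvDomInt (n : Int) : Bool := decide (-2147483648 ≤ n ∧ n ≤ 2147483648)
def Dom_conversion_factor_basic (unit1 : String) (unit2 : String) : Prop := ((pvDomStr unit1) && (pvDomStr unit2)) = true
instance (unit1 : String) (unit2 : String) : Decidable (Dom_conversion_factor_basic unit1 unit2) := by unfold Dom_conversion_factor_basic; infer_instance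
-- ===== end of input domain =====

-- B replaces A's three-way length branching plus swap-and-negate recursion with a uniform
-- parse-each-unit-to-exponent-and-subtract decomposition (objective: simpler).

-- ===== PORT A =====
-- the `prefixes` dict (keys are the 1-char prefix strings; Char stands for Python's length-1 str)
def pvPrefixes : PySem.Dict Char Int :=
  PySem.Dict.ofList [('n', -9), ('u', -6), ('m', -3), ('k', 3)]

-- A's body after `unit1, unit2 = unit1.lower(), unit2.lower()`, on the code-point lists;
-- `none` = the `raise error` paths (KeyError is re-raised as the same ValueError).
def convA (l1 l2 : List Char) : Option Int :=
  if l1.length = l2.length then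
    if l1 = l2 then some 0
    else if l1.tail ≠ l2.tail then none          -- unit1[1:] != unit2[1:] → raise
    else match PySem.List.pyGet? l1 0, PySem.List.pyGet? l2 0 with
      | some c1, some c2 =>
        match pvPrefixes.get? c1, pvPrefixes.get? c2 with
        | some p1, some p2 => some (p1 - p2)
        | _, _ => none                            -- KeyError → raise error
      | _, _ => none
  else if l2.length < l1.length then
    if l1.tail ≠ l2 then none                     -- unit1[1:] != unit2 → raise
    else match PySem.List.pyGet? l1 0 with
      | some c1 => pvPrefixes.get? c1             -- KeyError → none
      | none => none
  else
    (convA l2 l1).map Neg.neg                     -- return -conversion_factor_basic(unit2, unit1)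
termination_by (l2.length - l1.length : Nat)
decreasing_by
  rename_i h1 h2
  omega

def conversion_factor_basic (unit1 : String) (unit2 : String) : Int :=
  (convA (PySem.Chars.lower unit1.toList) (PySem.Chars.lower unit2.toList)).getD 0

-- ===== PORT B =====
-- B's `exp_of(u)`: 0 on the base itself, the prefix exponent on prefix+base, none = raise.
def expOf (base u : List Char) : Option Int :=
  if u = base then some 0
  else if u.length = base.length + 1 ∧ u.tail = base then
    match PySem.List.pyGet? u 0 with
    | some c => pvPrefixes.get? c                  -- `u[0] in prefixes` then lookup
    | none => none
  else none

def convB (l1 l2 : List Char) : Option Int :=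
  if l1 = l2 then some 0
  else
    let base := if l1.length < l2.length then l2.tail else l1.tail
    match expOf base l1, expOf base l2 with
    | some e1, some e2 => some (e1 - e2)
    | _, _ => none

def conversion_factor_basic_alt (unit1 : String) (unit2 : String) : Int :=
  (convB (PySem.Chars.lower unit1.toList) (PySem.Chars.lower unit2.toList)).getD 0

-- ===== PRECONDITION & SPEC =====
-- Pre_ admits exactly the inputs where Python A returns (everywhere else A raises ValueError,
-- and B raises the same ValueError): after lowercasing, the two units are equal, or they have
-- equal length with equal suffixes and both prefix characters known, or one is the other with
-- a known prefix character prepended.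
def PreL (l1 l2 : List Char) : Prop :=
  l1 = l2 ∨
  (l1.length = l2.length ∧ l1.tail = l2.tail ∧
     l1.headD ' ' ∈ ['n', 'u', 'm', 'k'] ∧ l2.headD ' ' ∈ ['n', 'u', 'm', 'k']) ∨
  (l1.length = l2.length + 1 ∧ l1.tail = l2 ∧ l1.headD ' ' ∈ ['n', 'u', 'm', 'k']) ∨
  (l2.length = l1.length + 1 ∧ l2.tail = l1 ∧ l2.headD ' ' ∈ ['n', 'u', 'm', 'k'])

def Pre_conversion_factor_basic (unit1 : String) (unit2 : String) : Prop :=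
  PreL (PySem.Chars.lower unit1.toList) (PySem.Chars.lower unit2.toList)

instance (unit1 : String) (unit2 : String) : Decidable (Pre_conversion_factor_basic unit1 unit2) := by
  unfold Pre_conversion_factor_basic PreL; infer_instance

def pvWitness_conversion_factor_basic : String × String := ("nM", "mM")

def Spec_conversion_factor_basic (unit1 : String) (unit2 : String) (out : Int) : Prop :=
  out = conversion_factor_basic_alt unit1 unit2
instance (unit1 : String) (unit2 : String) (out : Int) : Decidable (Spec_conversion_factor_basic unit1 unit2 out) := by
  unfold Spec_conversion_factor_basic; infer_instance

-- ===== CLAIM (what is proved, stated in full; the proofs are below) =====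
def Claim_equal_conversion_factor_basic : Prop := ∀ (unit1 : String) (unit2 : String), Dom_conversion_factor_basic unit1 unit2 → Pre_conversion_factor_basic unit1 unit2 → Spec_conversion_factor_basic unit1 unit2 (conversion_factor_basic unit1 unit2)

-- ===== LEMMAS AND PROOFS =====

theorem pfx_isSome_of_mem {c : Char} (h : c ∈ ['n', 'u', 'm', 'k']) :
    ∃ v, pvPrefixes.get? c = some v := by
  fin_cases h <;> exact ⟨_, rfl⟩

theorem expOf_self (l : List Char) : expOf l l = some 0 := by
  simp [expOf]

theorem cons_ne_self (a : Char) (t : List Char) : a :: t ≠ t := by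
  intro he; apply_fun List.length at he; simp at he

theorem expOf_cons (a : Char) (t : List Char) :
    expOf t (a :: t) = pvPrefixes.get? a := by
  simp [expOf, PySem.List.pyGet?, PySem.List.pyIdx?]

theorem convAB_eq (l : List Char) : (convA l l).getD 0 = (convB l l).getD 0 := by
  rw [convA]; simp [convB]

theorem convAB_same_len (a b : Char) (t : List Char)
    (hm1 : a ∈ ['n', 'u', 'm', 'k']) (hm2 : b ∈ ['n', 'u', 'm', 'k']) :
    (convA (a :: t) (b :: t)).getD 0 = (convB (a :: t) (b :: t)).getD 0 := by
  by_cases heq : a = b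
  · subst heq; exact convAB_eq _
  · obtain ⟨pa, hpa⟩ := pfx_isSome_of_mem hm1
    obtain ⟨pb, hpb⟩ := pfx_isSome_of_mem hm2
    have hne : (a : Char) :: t ≠ b :: t := by simp [heq]
    rw [convA]
    simp [convB, hne, hpa, hpb, expOf_cons, PySem.List.pyGet?, PySem.List.pyIdx?]

theorem convA_longer (a : Char) (t : List Char) :
    convA (a :: t) t = pvPrefixes.get? a := by
  rw [convA]
  simp [PySem.List.pyGet?, PySem.List.pyIdx?]

theorem convAB_longer (a : Char) (t : List Char) (hm : a ∈ ['n', 'u', 'm', 'k']) :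
    (convA (a :: t) t).getD 0 = (convB (a :: t) t).getD 0 := by
  obtain ⟨pa, hpa⟩ := pfx_isSome_of_mem hm
  rw [convA_longer]
  simp [convB, hpa, expOf_self, expOf_cons,
        show ¬ (a :: t).length < t.length by simp]

theorem convAB_shorter (b : Char) (t : List Char) (hm : b ∈ ['n', 'u', 'm', 'k']) :
    (convA t (b :: t)).getD 0 = (convB t (b :: t)).getD 0 := by
  obtain ⟨pb, hpb⟩ := pfx_isSome_of_mem hm
  rw [convA]
  simp [convB, convA_longer, (cons_ne_self b t).symm, hpb, expOf_self, expOf_cons,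
        show ¬ (b :: t).length < t.length by simp]

theorem convAB (l1 l2 : List Char) (h : PreL l1 l2) :
    (convA l1 l2).getD 0 = (convB l1 l2).getD 0 := by
  rcases h with heq | ⟨hlen, htail, hm1, hm2⟩ | ⟨hlen, htail, hm⟩ | ⟨hlen, htail, hm⟩
  · subst heq; exact convAB_eq _
  · cases l1 with
    | nil =>
      cases l2 with
      | nil => exact convAB_eq _
      | cons b t2 => simp at hlen
    | cons a t1 =>
      cases l2 with
      | nil => simp at hlen
      | cons b t2 =>
        simp only [List.tail_cons] at htail
        subst htail
        simp only [List.headD_cons] at hm1 hm2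
        exact convAB_same_len a b t1 hm1 hm2
  · cases l1 with
    | nil => simp at hlen
    | cons a t =>
      simp only [List.tail_cons] at htail
      subst htail
      simp only [List.headD_cons] at hm
      exact convAB_longer a _ hm
  · cases l2 with
    | nil => simp at hlen
    | cons b t =>
      simp only [List.tail_cons] at htail
      subst htail
      simp only [List.headD_cons] at hm
      exact convAB_shorter b _ hm

theorem conversion_factor_basic_spec : Claim_equal_conversion_factor_basic := by
  intro u1 u2 _ hpre
  show _ = _
  exact convAB _ _ hpre
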